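-- pv_equiv track=rewrite | github.com/TheCarton/leetCode | medianOfTwoSortedArrays/median.py | switch_number_to_smaller_list
-- ===== SOURCE A (Python) =====
-- def switch_number_to_smaller_list(small_list, big_list):
--     if big_list[0] >= small_list[-1]:
--         small_list.append(big_list.pop(0))
--         return small_list, big_list
--     else:
--         for i, n in enumerate(small_list):
--             if big_list[0] <= n:
--                 small_list.insert(i, big_list.pop(0))
--                 break
--     return small_list, big_list
-- ===== SOURCE B (Python) =====
-- def switch_number_to_smaller_list(small_list, big_list):
--     if big_list[0] >= small_list[-1]:
--         small_list.append(big_list.pop(0))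
--         return small_list, big_list
--     small_list[:] = _inserted_before_first_ge(small_list, big_list.pop(0))
--     return small_list, big_list
--
--
-- def _inserted_before_first_ge(xs, x):
--     # rebuild xs front-to-back, placing x before the first element >= x
--     if x <= xs[0]:
--         return [x] + xs
--     return [xs[0]] + _inserted_before_first_ge(xs[1:], x)
-- ===== Notes on version B (the rewrite author's own statement) =====
-- stated objective: alternative
-- what changed: The enumerate-scan with an in-place list.insert is replaced by a recursive front-to-back rebuild that places the element before the first value >= it; the index bookkeeping and the insert call disappear.
import Mathlib
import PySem

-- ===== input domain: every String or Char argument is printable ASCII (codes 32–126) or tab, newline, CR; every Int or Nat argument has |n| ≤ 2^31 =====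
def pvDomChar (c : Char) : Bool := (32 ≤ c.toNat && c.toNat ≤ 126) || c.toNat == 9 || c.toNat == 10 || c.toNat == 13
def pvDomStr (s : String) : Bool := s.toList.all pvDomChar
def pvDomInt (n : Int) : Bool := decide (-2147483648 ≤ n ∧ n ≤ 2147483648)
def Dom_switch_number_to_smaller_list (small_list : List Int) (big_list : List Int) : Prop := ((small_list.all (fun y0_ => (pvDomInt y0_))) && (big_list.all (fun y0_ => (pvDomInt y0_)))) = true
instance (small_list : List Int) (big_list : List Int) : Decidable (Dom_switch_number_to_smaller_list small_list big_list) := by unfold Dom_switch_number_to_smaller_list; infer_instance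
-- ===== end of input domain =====

-- B rebuilds the list recursively (front-to-back, x placed before the first element ≥ x)
-- instead of A's enumerate-scan with an in-place insert; objective: alternative decomposition.
-- Both Pythons mutate their arguments in place; the equivalence proved here is about the return value.

-- ===== PORT A =====
-- the 'for i, n in enumerate(small_list): if big0 <= n: insert & break' loop;
-- returns the (possibly updated) small list and whether big_list.pop(0) happened.
def pvLoopA (b0 : Int) (cur : List Int) (idx : Nat) (orig : List Int) : List Int × Bool :=
  match cur with
  | [] => (orig, false)
  | n :: rest =>
    if b0 ≤ n then (PySem.List.insert orig (idx : Int) b0, true)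
    else pvLoopA b0 rest (idx + 1) orig

def switch_number_to_smaller_list (small_list : List Int) (big_list : List Int) : List Int × List Int :=
  match PySem.List.pyGet? big_list 0, PySem.List.pyGet? small_list (-1) with
  | some b0, some slast =>
    if b0 ≥ slast then
      (small_list ++ [b0], big_list.tail)
    else
      let r := pvLoopA b0 small_list 0 small_list
      (r.1, if r.2 then big_list.tail else big_list)
  | _, _ => ([], [])  -- IndexError in Python: excluded by Pre_

-- ===== PORT B =====
def pvInsertedBeforeFirstGe (xs : List Int) (x : Int) : List Int :=
  match xs with
  | [] => [x]  -- xs[0] would raise in Python; unreachable under Pre_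
  | y :: rest => if x ≤ y then x :: y :: rest else y :: pvInsertedBeforeFirstGe rest x

def switch_number_to_smaller_list_alt (small_list : List Int) (big_list : List Int) : List Int × List Int :=
  match PySem.List.pyGet? big_list 0 with
  | none => ([], [])  -- IndexError in Python: excluded by Pre_
  | some b0 =>
    match PySem.List.pyGet? small_list (-1) with
    | none => ([], [])  -- IndexError in Python: excluded by Pre_
    | some slast =>
      if b0 ≥ slast then (small_list ++ [b0], big_list.tail)
      else (pvInsertedBeforeFirstGe small_list b0, big_list.tail)

-- ===== PRECONDITION & SPEC =====
-- Python A raises IndexError (big_list[0] / small_list[-1]) iff either list is empty.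
def Pre_switch_number_to_smaller_list (small_list : List Int) (big_list : List Int) : Prop :=
  small_list ≠ [] ∧ big_list ≠ []
instance (small_list : List Int) (big_list : List Int) : Decidable (Pre_switch_number_to_smaller_list small_list big_list) := by unfold Pre_switch_number_to_smaller_list; infer_instance

def pvWitness_switch_number_to_smaller_list : List Int × List Int := ([1, 3, 5], [2, 9])

def Spec_switch_number_to_smaller_list (small_list : List Int) (big_list : List Int) (out : List Int × List Int) : Prop := out = switch_number_to_smaller_list_alt small_list big_list
instance (small_list : List Int) (big_list : List Int) (out : List Int × List Int) : Decidable (Spec_switch_number_to_smaller_list small_list big_list out) := by unfold Spec_switch_number_to_smaller_list; infer_instance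

-- ===== CLAIM (what is proved, stated in full; the proofs are below) =====
def Claim_equal_switch_number_to_smaller_list : Prop := ∀ (small_list : List Int) (big_list : List Int), Dom_switch_number_to_smaller_list small_list big_list → Pre_switch_number_to_smaller_list small_list big_list → Spec_switch_number_to_smaller_list small_list big_list (switch_number_to_smaller_list small_list big_list)

-- ===== LEMMAS AND PROOFS =====

-- A's scan, started after a prefix `pre` of elements all < b0, agrees with B's
-- recursive rebuild of the remaining part, provided some element ≥ b0 exists in `cur`.
theorem pvLoopA_eq_insert (b0 : Int) :
    ∀ (cur pre : List Int), (∀ y ∈ pre, ¬ b0 ≤ y) → (∃ n ∈ cur, b0 ≤ n) →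
      pvLoopA b0 cur pre.length (pre ++ cur) = (pre ++ pvInsertedBeforeFirstGe cur b0, true) := by
  intro cur
  induction cur with
  | nil => intro pre _ hex; rcases hex with ⟨n, hn, _⟩; simp at hn
  | cons n rest ih =>
    intro pre hpre hex
    by_cases h : b0 ≤ n
    · simp [pvLoopA, pvInsertedBeforeFirstGe, h,
        PySem.List.insert_natCast (pre ++ n :: rest) pre.length b0 (by simp)]
    · have hstep := ih (pre ++ [n]) (by
        intro y hy
        rcases List.mem_append.mp hy with h1 | h1
        · exact hpre y h1
        · simp at h1; subst h1; exact h)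
        (by rcases hex with ⟨m, hm, hbm⟩
            rcases List.mem_cons.mp hm with h1 | h1
            · subst h1; exact absurd hbm h
            · exact ⟨m, h1, hbm⟩)
      simp only [List.length_append, List.length_cons, List.length_nil, List.append_assoc,
        List.cons_append, List.nil_append] at hstep
      simp [pvLoopA, pvInsertedBeforeFirstGe, h]
      simpa using hstep

-- ===== VERDICT (by name: the statement is the Claim_ definition above) =====
theorem switch_number_to_smaller_list_spec : Claim_equal_switch_number_to_smaller_list := by
  intro small big _ hpre
  rcases hpre with ⟨hs, hb⟩
  unfold Spec_switch_number_to_smaller_list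
  unfold switch_number_to_smaller_list switch_number_to_smaller_list_alt
  rcases big with _ | ⟨b0, bt⟩
  · exact absurd rfl hb
  have hget : PySem.List.pyGet? (b0 :: bt) 0 = some b0 := by
    simp
  have hlast : PySem.List.pyGet? small (-1) = some (small.getLast hs) := by
    rw [PySem.List.pyGet?_neg_one]; exact List.getLast?_eq_some_getLast hs
  rw [hget, hlast]
  by_cases h : b0 ≥ small.getLast hs
  · simp [h]
  · simp only [h, if_false]
    have hex : ∃ n ∈ small, b0 ≤ n :=
      ⟨small.getLast hs, List.getLast_mem hs, le_of_lt (lt_of_not_ge h)⟩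
    have := pvLoopA_eq_insert b0 small [] (by simp) hex
    simp only [List.length_nil, List.nil_append] at this
    simp [this]
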